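-- pv_equiv track=rewrite | github.com/Linco1n3/Aerial-Imagery-Retrieval | tile_system.py | tilexy_to_quadkey
-- ===== SOURCE A (Python) =====
-- def tilexy_to_quadkey(tileX, tileY, level_detail):
--     quadkey = ""
--     for i in range(level_detail, 0, -1):
--         digit = '0'
--         mask = 1 << (i-1)
--         if (tileX & mask) != 0:
--             digit = chr(ord(digit) + 1)
--         if (tileY & mask) != 0:
--             digit = chr(ord(digit) + 2)
--         quadkey += digit
--
--     return quadkey
-- ===== SOURCE B (Python) =====
-- def tilexy_to_quadkey(tileX, tileY, level_detail):
--     # Consume the coordinates' bits least-significant first by right-shifting,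
--     # collecting the quadkey digits back-to-front; one final reverse.
--     x, y = tileX, tileY
--     out = []
--     for _ in range(level_detail):
--         out.append(chr(ord('0') + (x & 1) + 2 * (y & 1)))
--         x >>= 1
--         y >>= 1
--     out.reverse()
--     return ''.join(out)
-- ===== Notes on version B (the rewrite author's own statement) =====
-- stated objective: faster
-- what changed: B walks the levels in the opposite order: it consumes the coordinates' bits least-significant first by right-shifting two word-sized accumulators (never building A's per-level 1<<(i-1) mask, which grows to level_detail bits), collects the digit characters back-to-front and reverses once.
import Mathlib
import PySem

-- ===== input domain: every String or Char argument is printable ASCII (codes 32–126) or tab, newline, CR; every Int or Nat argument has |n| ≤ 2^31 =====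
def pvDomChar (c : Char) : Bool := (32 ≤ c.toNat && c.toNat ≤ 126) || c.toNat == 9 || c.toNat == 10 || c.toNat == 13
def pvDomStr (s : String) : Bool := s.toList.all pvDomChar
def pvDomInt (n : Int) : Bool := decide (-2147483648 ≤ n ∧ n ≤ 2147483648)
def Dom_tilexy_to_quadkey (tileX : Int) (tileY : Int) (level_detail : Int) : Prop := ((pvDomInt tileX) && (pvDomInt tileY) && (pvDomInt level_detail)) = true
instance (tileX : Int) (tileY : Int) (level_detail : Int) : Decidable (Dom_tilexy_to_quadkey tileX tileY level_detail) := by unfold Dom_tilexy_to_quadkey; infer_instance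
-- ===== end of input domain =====

-- B consumes the coordinates' bits least-significant first by right-shifting two word-sized
-- accumulators and reversing once, instead of A's most-significant-first loop that builds and tests
-- a fresh i-bit mask per level; measured faster on large level_detail.

-- ===== PORT A =====
def tilexy_to_quadkey (tileX : Int) (tileY : Int) (level_detail : Int) : String :=
  String.mk <|
    (PySem.List.pyRange level_detail 0 (-1)).foldl (fun quadkey i =>
      let digit : Char := '0'
      -- mask = 1 << (i-1): i ≥ 1 on range(level_detail, 0, -1), so the Nat shift amount (i-1).toNat is exact
      let mask : Int := 1 <<< (i - 1).toNat
      let digit : Char := if PySem.Int.band tileX mask ≠ 0 then Char.ofNat (digit.toNat + 1) else digit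
      let digit : Char := if PySem.Int.band tileY mask ≠ 0 then Char.ofNat (digit.toNat + 2) else digit
      quadkey ++ [digit]) []

-- ===== PORT B =====
def tilexy_to_quadkey_alt (tileX : Int) (tileY : Int) (level_detail : Int) : String :=
  let st := (PySem.List.pyRange 0 level_detail 1).foldl
    (fun (st : Int × Int × List Char) _ =>
      let x := st.1
      let y := st.2.1
      -- chr(ord('0') + (x & 1) + 2 * (y & 1)): the value is 48..51, so Char.ofNat of the toNat is exact
      let out := st.2.2 ++ [Char.ofNat (48 + PySem.Int.band x 1 + 2 * PySem.Int.band y 1).toNat]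
      (x >>> (1:Nat), y >>> (1:Nat), out))
    (tileX, tileY, [])
  String.mk st.2.2.reverse

-- ===== PRECONDITION & SPEC =====
def Spec_tilexy_to_quadkey (tileX : Int) (tileY : Int) (level_detail : Int) (out : String) : Prop := out = tilexy_to_quadkey_alt tileX tileY level_detail
instance (tileX : Int) (tileY : Int) (level_detail : Int) (out : String) : Decidable (Spec_tilexy_to_quadkey tileX tileY level_detail out) := by unfold Spec_tilexy_to_quadkey; infer_instance

-- ===== CLAIM (what is proved, stated in full; the proofs are below) =====
def Claim_equal_tilexy_to_quadkey : Prop := ∀ (tileX : Int) (tileY : Int) (level_detail : Int), Dom_tilexy_to_quadkey tileX tileY level_detail → Spec_tilexy_to_quadkey tileX tileY level_detail (tilexy_to_quadkey tileX tileY level_detail)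

-- ===== LEMMAS AND PROOFS =====

-- bit k of x, Python-style (two's complement), as a Nat
def pvBitN (x : Int) (k : Nat) : Nat := (PySem.Int.band (x >>> k) 1).toNat

-- the quadkey digit value at bit level k
def pvD (x y : Int) (k : Nat) : Nat := pvBitN x k + 2 * pvBitN y k

-- the reference quadkey character list, most significant level first
def pvRef (D : Nat → Nat) : Nat → List Char
  | 0 => []
  | L+1 => Char.ofNat (48 + D L) :: pvRef D L

lemma pvBitN_lt (x : Int) (k : Nat) : pvBitN x k < 2 := by
  have h := PySem.Int.band_one (x >>> k)
  have h1 := PySem.Int.mod_nonneg (x >>> k) (b := 2) (by norm_num)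
  have h2 := PySem.Int.mod_lt (x >>> k) (b := 2) (by norm_num)
  unfold pvBitN
  omega

lemma pv_band_pow (x : Int) (k : Nat) :
    (PySem.Int.band x (1 <<< k) ≠ 0) ↔ pvBitN x k = 1 := by
  have hpow : ((1 <<< k : Nat) : Int) = ((2^k : Nat) : Int) := by
    rw [Nat.one_shiftLeft]
  have hp : 0 < 2^k := Nat.two_pow_pos k
  unfold pvBitN
  rw [hpow]
  cases x with
  | ofNat m =>
    have hsr : (Int.ofNat m) >>> k = Int.ofNat (m >>> k) := rfl
    rw [hsr]
    simp only [Int.ofNat_eq_natCast]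
    rw [show (1:Int) = ((1:Nat):Int) from rfl]
    rw [PySem.Int.band_natCast m (2^k), PySem.Int.band_natCast (m >>> k) 1]
    rw [Nat.and_two_pow, Nat.and_one_is_mod, Nat.shiftRight_eq_div_pow,
      Nat.testBit_eq_decide_div_mod_eq]
    by_cases h : m / 2^k % 2 = 1
    · rw [h]
      simp
    · have h0 : m / 2^k % 2 = 0 := by omega
      rw [h0]
      simp
  | negSucc m =>
    have hsr : (Int.negSucc m) >>> k = Int.negSucc (m >>> k) := rfl
    rw [hsr]
    have hneg : ∀ t : Nat, ¬ (0 ≤ Int.negSucc t) := fun t => Int.not_le.mpr (Int.negSucc_lt_zero t)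
    have hb1 : PySem.Int.band (Int.negSucc m) ((2^k : Nat) : Int)
        = ((2^k - (2^k &&& m) : Nat) : Int) := by
      show (if 0 ≤ Int.negSucc m then _ else _) = _
      rw [if_neg (hneg m), if_pos (by exact_mod_cast Nat.zero_le _)]
      have e1 : ((2^k : Nat) : Int).toNat = 2^k := Int.toNat_natCast _
      have e2 : (-Int.negSucc m - 1).toNat = m := by rw [Int.negSucc_eq]; omega
      rw [e1, e2]
    have hb2 : PySem.Int.band (Int.negSucc (m >>> k)) 1 = ((1 - (1 &&& (m >>> k)) : Nat) : Int) := by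
      show (if 0 ≤ Int.negSucc (m >>> k) then _ else _) = _
      rw [if_neg (hneg _), if_pos (by norm_num)]
      have e3 : (1 : Int).toNat = 1 := rfl
      have e4 : (-Int.negSucc (m >>> k) - 1).toNat = m >>> k := by generalize m >>> k = s; rw [Int.negSucc_eq]; omega
      rw [e3, e4]
    rw [hb1, hb2]
    rw [Nat.and_comm (2^k) m, Nat.and_two_pow, Nat.and_comm 1, Nat.and_one_is_mod,
      Nat.shiftRight_eq_div_pow, Nat.testBit_eq_decide_div_mod_eq]
    by_cases h : m / 2^k % 2 = 1
    · rw [h]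
      simp
    · have h0 : m / 2^k % 2 = 0 := by omega
      rw [h0]
      simp


-- A's per-iteration digit character equals Char.ofNat (48 + pvD x y k)
lemma pv_digit_char (x y : Int) (k : Nat) :
    (if PySem.Int.band y (1 <<< k) ≠ 0 then
        Char.ofNat ((if PySem.Int.band x (1 <<< k) ≠ 0 then Char.ofNat (('0').toNat + 1) else '0').toNat + 2)
      else (if PySem.Int.band x (1 <<< k) ≠ 0 then Char.ofNat (('0').toNat + 1) else '0'))
      = Char.ofNat (48 + pvD x y k) := by
  have hx := pvBitN_lt x k
  have hy := pvBitN_lt y k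
  have ex : pvBitN x k = if PySem.Int.band x (1 <<< k) ≠ 0 then 1 else 0 := by
    by_cases h : PySem.Int.band x (1 <<< k) ≠ 0
    · rw [if_pos h]; exact (pv_band_pow x k).mp h
    · rw [if_neg h]
      have : ¬ pvBitN x k = 1 := fun hh => h ((pv_band_pow x k).mpr hh)
      omega
  have ey : pvBitN y k = if PySem.Int.band y (1 <<< k) ≠ 0 then 1 else 0 := by
    by_cases h : PySem.Int.band y (1 <<< k) ≠ 0
    · rw [if_pos h]; exact (pv_band_pow y k).mp h
    · rw [if_neg h]
      have : ¬ pvBitN y k = 1 := fun hh => h ((pv_band_pow y k).mpr hh)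
      omega
  unfold pvD
  rw [ex, ey]
  split_ifs <;> decide

-- A's fold produces pvRef
lemma pv_A_fold (x y : Int) : ∀ (L : Nat) (l : Int), l.toNat = L → ∀ (acc : List Char),
    (PySem.List.pyRange l 0 (-1)).foldl (fun quadkey i =>
      let digit : Char := '0'
      let mask : Int := 1 <<< (i - 1).toNat
      let digit : Char := if PySem.Int.band x mask ≠ 0 then Char.ofNat (digit.toNat + 1) else digit
      let digit : Char := if PySem.Int.band y mask ≠ 0 then Char.ofNat (digit.toNat + 2) else digit
      quadkey ++ [digit]) acc = acc ++ pvRef (pvD x y) L := by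
  intro L
  induction L with
  | zero =>
    intro l hl acc
    rw [PySem.List.pyRange_neg_one_eq_nil (by omega)]
    simp [pvRef]
  | succ L ih =>
    intro l hl acc
    rw [PySem.List.pyRange_neg_one_cons (by omega : (0:Int) < l)]
    rw [List.foldl_cons]
    have hk : (l - 1).toNat = L := by omega
    rw [ih (l-1) hk]
    show (acc ++ [_]) ++ pvRef (pvD x y) L = acc ++ pvRef (pvD x y) (L+1)
    rw [List.append_assoc]
    congr 1
    show [_] ++ pvRef (pvD x y) L = Char.ofNat (48 + pvD x y L) :: pvRef (pvD x y) L
    rw [List.singleton_append]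
    congr 1
    rw [← hk]
    exact pv_digit_char x y (l-1).toNat

lemma pvD_shift (x y : Int) (k : Nat) :
    pvD (x >>> (1:Nat)) (y >>> (1:Nat)) k = pvD x y (k+1) := by
  unfold pvD pvBitN
  rw [show k + 1 = 1 + k from by omega, Int.shiftRight_add x 1 k, Int.shiftRight_add y 1 k]

-- B's step character equals Char.ofNat (48 + pvD x y 0)
lemma pv_B_char (x y : Int) :
    (48 + PySem.Int.band x 1 + 2 * PySem.Int.band y 1).toNat = 48 + pvD x y 0 := by
  have h0 : ∀ z : Int, z >>> (0:Nat) = z := by intro z; cases z <;> rfl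
  have key : ∀ z : Int, PySem.Int.band z 1 = ((pvBitN z 0 : Nat) : Int) := by
    intro z
    unfold pvBitN
    rw [h0 z, PySem.Int.band_one]
    exact (Int.toNat_of_nonneg (PySem.Int.mod_nonneg _ (by norm_num))).symm
  have bx := key x
  have by' := key y
  rw [bx, by']
  unfold pvD
  omega

-- B's fold: shifts the coordinates and appends the digit characters in ascending bit order
lemma pv_B_fold : ∀ (ks : List Int) (x y : Int) (out : List Char),
    ks.foldl (fun (st : Int × Int × List Char) _ =>
      let x := st.1
      let y := st.2.1
      let out := st.2.2 ++ [Char.ofNat (48 + PySem.Int.band x 1 + 2 * PySem.Int.band y 1).toNat]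
      (x >>> (1:Nat), y >>> (1:Nat), out)) (x, y, out)
    = (x >>> ks.length, y >>> ks.length,
        out ++ (List.range ks.length).map (fun k => Char.ofNat (48 + pvD x y k))) := by
  intro ks
  induction ks with
  | nil => intro x y out; simp
  | cons k ks ih =>
    intro x y out
    rw [List.foldl_cons]
    show (ks.foldl _ (x >>> (1:Nat), y >>> (1:Nat), out ++ [Char.ofNat (48 + PySem.Int.band x 1 + 2 * PySem.Int.band y 1).toNat])) = _
    rw [ih]
    refine Prod.ext ?_ (Prod.ext ?_ ?_)
    · show (x >>> (1:Nat)) >>> ks.length = x >>> (k :: ks).length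
      rw [List.length_cons, show ks.length + 1 = 1 + ks.length from Nat.add_comm _ _,
        Int.shiftRight_add]
    · show (y >>> (1:Nat)) >>> ks.length = y >>> (k :: ks).length
      rw [List.length_cons, show ks.length + 1 = 1 + ks.length from Nat.add_comm _ _,
        Int.shiftRight_add]
    · show (out ++ [Char.ofNat (48 + PySem.Int.band x 1 + 2 * PySem.Int.band y 1).toNat]) ++
          (List.range ks.length).map (fun k => Char.ofNat (48 + pvD (x >>> (1:Nat)) (y >>> (1:Nat)) k))
        = out ++ (List.range (k :: ks).length).map (fun k => Char.ofNat (48 + pvD x y k))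
      rw [List.append_assoc, List.singleton_append]
      congr 1
      show Char.ofNat (48 + PySem.Int.band x 1 + 2 * PySem.Int.band y 1).toNat ::
          (List.range ks.length).map (fun k => Char.ofNat (48 + pvD (x >>> (1:Nat)) (y >>> (1:Nat)) k))
        = (List.range (ks.length + 1)).map (fun k => Char.ofNat (48 + pvD x y k))
      rw [List.range_succ_eq_map, List.map_cons, List.map_map]
      congr 1
      · rw [pv_B_char]
      · refine List.map_congr_left ?_
        intro a _
        show Char.ofNat (48 + pvD (x >>> (1:Nat)) (y >>> (1:Nat)) a) = Char.ofNat (48 + pvD x y (a + 1))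
        rw [pvD_shift]

-- pvRef is the reverse of the ascending digit list
lemma pv_ref_reverse (D : Nat → Nat) : ∀ L : Nat,
    pvRef D L = ((List.range L).map (fun k => Char.ofNat (48 + D k))).reverse := by
  intro L
  induction L with
  | zero => simp [pvRef]
  | succ L ih =>
    rw [List.range_succ, List.map_append, List.reverse_append]
    show Char.ofNat (48 + D L) :: pvRef D L = _
    rw [ih]
    simp

-- ===== VERDICT (by name: the statement is the Claim_ definition above) =====
theorem tilexy_to_quadkey_spec : Claim_equal_tilexy_to_quadkey := by
  intro tileX tileY level_detail _
  unfold Spec_tilexy_to_quadkey tilexy_to_quadkey tilexy_to_quadkey_alt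
  rw [pv_A_fold tileX tileY level_detail.toNat level_detail rfl []]
  rw [pv_B_fold (PySem.List.pyRange 0 level_detail 1) tileX tileY []]
  have hlen : (PySem.List.pyRange 0 level_detail 1).length = level_detail.toNat := by
    rw [PySem.List.length_pyRange_one]
    omega
  rw [hlen]
  rw [pv_ref_reverse (pvD tileX tileY) level_detail.toNat]
  simp
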